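-- pv_equiv track=rewrite | github.com/mojtabaSefidi/AI-Challenge-PoliceVsThieves | AI.py | construct_directed_graph
-- ===== SOURCE A (Python) =====
-- def construct_directed_graph(nodes, init_directed_graph):
--     '''
--     This method makes sure that the directed_graph is symmetrical. In other words, if there's a path from node A to B with a value V, there needs to be a path from node B to node A with a value V.
--     '''
--     directed_graph = {}
--     for node in nodes:
--         directed_graph[node] = {}
--
--     directed_graph.update(init_directed_graph)
--
--     for node, edges in directed_graph.items():
--         for adjacent_node, value in edges.items():
--             if directed_graph[adjacent_node].get(node, False) == False:
--                 directed_graph[adjacent_node][node] = value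
--
--     return directed_graph
-- ===== SOURCE B (Python) =====
-- def construct_directed_graph(nodes, init_directed_graph):
--     base = {node: {} for node in nodes}
--     base.update(init_directed_graph)
--
--     # reverse-adjacency index: rev[t] holds {source: value} for every edge source -> t
--     rev = {k: {} for k in base}
--     for source, edges in base.items():
--         for target, value in edges.items():
--             rev[target][source] = value
--
--     # rebuild each node's dict: its own edges, merged with the missing reverse edges
--     # (value 0 counts as missing, like A's `get(node, False) == False`)
--     return {
--         k: {**edges,
--             **{j: v for j, v in rev[k].items() if edges.get(j, False) == False}}
--         for k, edges in base.items()
--     }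
-- ===== Notes on version B (the rewrite author's own statement) =====
-- stated objective: alternative
-- what changed: A symmetrizes by a single pass that mutates the adjacency dicts in place while still iterating them (later nodes see edges added earlier, a cascade); B instead builds a reverse-adjacency index rev[t] = {source: value} in one pass and then rebuilds every node's dict non-destructively by merging its snapshot edges with the filtered in-edges from the index, relying on the proved fact that A's cascade writes never change the final content.
import Mathlib
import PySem

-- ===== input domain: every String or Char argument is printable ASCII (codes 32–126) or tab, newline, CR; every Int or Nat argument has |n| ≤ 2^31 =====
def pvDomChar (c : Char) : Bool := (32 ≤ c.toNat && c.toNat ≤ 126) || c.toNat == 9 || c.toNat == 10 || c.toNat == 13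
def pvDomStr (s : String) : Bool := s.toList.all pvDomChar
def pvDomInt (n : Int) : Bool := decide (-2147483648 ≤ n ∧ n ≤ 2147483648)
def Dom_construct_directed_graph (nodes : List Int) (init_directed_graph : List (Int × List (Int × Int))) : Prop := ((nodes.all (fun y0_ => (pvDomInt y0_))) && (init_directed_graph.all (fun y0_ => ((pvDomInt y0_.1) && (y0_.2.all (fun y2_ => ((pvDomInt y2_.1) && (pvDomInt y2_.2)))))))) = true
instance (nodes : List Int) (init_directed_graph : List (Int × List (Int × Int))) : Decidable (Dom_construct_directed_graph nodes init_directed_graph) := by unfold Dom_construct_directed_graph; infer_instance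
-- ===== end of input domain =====

-- B replaces A's single in-place cascading pass (inner dicts mutated while still being iterated)
-- by building a reverse-adjacency index and rebuilding every node's dict from its snapshot edges
-- merged with the filtered in-edges; equivalence rests on the proved fact that A's cascade writes
-- never change the final content. A mutates the inner dicts of init_directed_graph in place,
-- B builds fresh dicts — the equivalence proved here is about the RETURN value.


-- ===== PORT A =====
-- shared initialization of both Pythons: {node: {} for node in nodes} then .update(init_directed_graph);
-- the inner association lists become dicts exactly as Python's dict does (first position, last value wins)
def pvToDict (es : List (Int × Int)) : PySem.Dict Int Int :=
  es.foldl (fun d p => d.insert p.1 p.2) PySem.Dict.empty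

def pvGraph (nodes : List Int) (init_directed_graph : List (Int × List (Int × Int))) :
    PySem.Dict Int (PySem.Dict Int Int) :=
  init_directed_graph.foldl (fun d p => d.insert p.1 (pvToDict p.2))
    (nodes.foldl (fun d node => d.insert node PySem.Dict.empty) PySem.Dict.empty)

-- `d.get(node, False) == False` — Python's int 0 == False, so missing-or-zero
def pvMiss (d : PySem.Dict Int Int) (node : Int) : Bool :=
  match d.get? node with
  | none => true
  | some v => v == 0

-- body of A's inner loop; `directed_graph[adjacent_node]` is a KeyError outside Pre_ (ported as getD)
def pvEdgeStep (node : Int) (g : PySem.Dict Int (PySem.Dict Int Int)) (p : Int × Int) :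
    PySem.Dict Int (PySem.Dict Int Int) :=
  if pvMiss (g.getD p.1 PySem.Dict.empty) node then
    g.insert p.1 ((g.getD p.1 PySem.Dict.empty).insert node p.2)
  else g

-- one iteration of A's outer loop: edges is read from the CURRENT (already mutated) state
def pvNodeStep (g : PySem.Dict Int (PySem.Dict Int Int)) (node : Int) :
    PySem.Dict Int (PySem.Dict Int Int) :=
  (g.getD node PySem.Dict.empty).items.foldl (pvEdgeStep node) g

def construct_directed_graph (nodes : List Int) (init_directed_graph : List (Int × List (Int × Int))) : List (Int × List (Int × Int)) :=
  let directed_graph := pvGraph nodes init_directed_graph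
  ((directed_graph.keys.foldl pvNodeStep directed_graph).items.map (fun q => (q.1, q.2.items)))

-- ===== PORT B =====
-- rev[target][source] = value for every edge source -> target; `rev[target]` is a KeyError
-- outside Pre_ (ported as getD, like A's port)
def pvRevStep (src : Int) (r : PySem.Dict Int (PySem.Dict Int Int)) (p : Int × Int) :
    PySem.Dict Int (PySem.Dict Int Int) :=
  r.insert p.1 ((r.getD p.1 PySem.Dict.empty).insert src p.2)

def pvRev (base : PySem.Dict Int (PySem.Dict Int Int)) : PySem.Dict Int (PySem.Dict Int Int) :=
  base.items.foldl (fun r q => q.2.items.foldl (pvRevStep q.1) r)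
    (base.keys.foldl (fun d k => d.insert k PySem.Dict.empty) PySem.Dict.empty)

-- {j: v for j, v in rev[k].items() if edges.get(j, False) == False}
def pvAdds (edges rk : PySem.Dict Int Int) : PySem.Dict Int Int :=
  rk.items.foldl (fun d p => if pvMiss edges p.1 then d.insert p.1 p.2 else d) PySem.Dict.empty

-- {**edges, **adds}
def pvIns (d : PySem.Dict Int Int) (pr : Int × Int) : PySem.Dict Int Int := d.insert pr.1 pr.2

def construct_directed_graph_alt (nodes : List Int) (init_directed_graph : List (Int × List (Int × Int))) : List (Int × List (Int × Int)) :=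
  let base := pvGraph nodes init_directed_graph
  let rev := pvRev base
  base.items.map (fun q =>
    (q.1, ((pvAdds q.2 (rev.getD q.1 PySem.Dict.empty)).items.foldl pvIns q.2).items))

-- ===== PRECONDITION & SPEC =====
-- Pre_ excludes exactly the inputs on which the Python A raises KeyError (and the Python B does
-- too): some edge of the constructed graph points to a target that is not a node (neither listed
-- in nodes nor a key of init_directed_graph).
def Pre_construct_directed_graph (nodes : List Int) (init_directed_graph : List (Int × List (Int × Int))) : Prop :=
  ∀ q ∈ (pvGraph nodes init_directed_graph).items, ∀ e ∈ q.2.items,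
    (pvGraph nodes init_directed_graph).contains e.1 = true
instance (nodes : List Int) (init_directed_graph : List (Int × List (Int × Int))) : Decidable (Pre_construct_directed_graph nodes init_directed_graph) := by unfold Pre_construct_directed_graph; infer_instance

def pvWitness_construct_directed_graph : List Int × (List (Int × List (Int × Int))) :=
  ([1, 2], [(1, [(2, 5)])])

def Spec_construct_directed_graph (nodes : List Int) (init_directed_graph : List (Int × List (Int × Int))) (out : List (Int × List (Int × Int))) : Prop := out = construct_directed_graph_alt nodes init_directed_graph
instance (nodes : List Int) (init_directed_graph : List (Int × List (Int × Int))) (out : List (Int × List (Int × Int))) : Decidable (Spec_construct_directed_graph nodes init_directed_graph out) := by unfold Spec_construct_directed_graph; infer_instance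

-- ===== CLAIM (what is proved, stated in full; the proofs are below) =====
def Claim_equal_construct_directed_graph : Prop := ∀ (nodes : List Int) (init_directed_graph : List (Int × List (Int × Int))), Dom_construct_directed_graph nodes init_directed_graph → Pre_construct_directed_graph nodes init_directed_graph → Spec_construct_directed_graph nodes init_directed_graph (construct_directed_graph nodes init_directed_graph)

-- ===== LEMMAS AND PROOFS =====

abbrev pvG := PySem.Dict Int (PySem.Dict Int Int)
abbrev pvE : PySem.Dict Int Int := PySem.Dict.empty

lemma pvMiss_congr {d d' : PySem.Dict Int Int} {k : Int} (h : d.get? k = d'.get? k) :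
    pvMiss d k = pvMiss d' k := by
  unfold pvMiss; rw [h]

-- the patch step shared by the proofs: directed_graph[t.1][t.2.1] = t.2.2
def pvApply (g : pvG) (t : Int × Int × Int) : pvG :=
  g.insert t.1 ((g.getD t.1 pvE).insert t.2.1 t.2.2)

-- the comprehension's filter on one edge (a, v) of node k, against the snapshot s
def pvSel (s : pvG) (k : Int) (p : Int × Int) : Option (Int × Int × Int) :=
  if pvMiss (s.getD p.1 pvE) k then some (p.1, k, p.2) else none

-- reverse edges contributed by one (node, edges) item of the snapshot
def pvPend (s : pvG) (q : Int × PySem.Dict Int Int) : List (Int × Int × Int) :=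
  q.2.items.filterMap (pvSel s q.1)

-- every edge of s as a (target, source, value) triple, in iteration order
def pvTriples (s : pvG) : List (Int × Int × Int) :=
  s.items.flatMap (fun q => q.2.items.map (fun p => (p.1, q.1, p.2)))

-- lookup at (x, y) through a patch fold, when no patch hits (x, y)
lemma pvApplyAll_stable (P : List (Int × Int × Int)) (g : pvG) (x y : Int)
    (h : ∀ t ∈ P, t.1 ≠ x ∨ t.2.1 ≠ y) :
    (((P.foldl pvApply g).getD x pvE).get? y) = ((g.getD x pvE).get? y) := by
  induction P generalizing g with
  | nil => rfl
  | cons t P ih =>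
    rw [List.foldl_cons, ih (pvApply g t) (fun u hu => h u (List.mem_cons_of_mem _ hu))]
    rcases h t List.mem_cons_self with ht | ht
    · unfold pvApply
      rw [PySem.Dict.getD_insert]
      split_ifs with hx
      · exact absurd hx.symm ht
      · rfl
    · unfold pvApply
      rw [PySem.Dict.getD_insert]
      split_ifs with hx
      · subst hx
        rw [PySem.Dict.get?_insert_of_ne _ _ (Ne.symm ht)]
      · rfl

-- the dict stored at x after a patch fold is the fold of the patches aimed at x
lemma pvApplyAll_getD (P : List (Int × Int × Int)) (g : pvG) (x : Int) :
    (P.foldl pvApply g).getD x pvE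
      = (P.filterMap (fun t => if t.1 = x then some (t.2.1, t.2.2) else none)).foldl pvIns
          (g.getD x pvE) := by
  induction P generalizing g with
  | nil => rfl
  | cons t P ih =>
    rw [List.foldl_cons, ih (pvApply g t), List.filterMap_cons]
    by_cases hx : t.1 = x
    · simp only [hx, if_pos]
      unfold pvApply
      rw [PySem.Dict.getD_insert, if_pos hx.symm, hx]
      rfl
    · rw [if_neg hx]
      unfold pvApply
      rw [PySem.Dict.getD_insert, if_neg (fun hh => hx hh.symm)]

lemma pvApplyAll_contains (P : List (Int × Int × Int)) (g : pvG) (x : Int)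
    (h : g.contains x = true) : (P.foldl pvApply g).contains x = true := by
  induction P generalizing g with
  | nil => exact h
  | cons t P ih =>
    rw [List.foldl_cons]
    apply ih
    unfold pvApply
    rw [PySem.Dict.contains_insert, h, Bool.or_true]

lemma pvGetD_nodup (g : pvG) (h : ∀ q ∈ g.items, q.2.keys.Nodup) (x : Int) :
    ((g.getD x pvE).keys.Nodup) := by
  cases hx : g.get? x with
  | none => rw [PySem.Dict.getD_of_get?_eq_none g pvE hx]; exact PySem.Dict.nodup_keys_empty
  | some v =>
    rw [PySem.Dict.getD_of_get?_eq_some g pvE hx]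
    exact h (x, v) (PySem.Dict.mem_items_of_get?_eq_some g hx)

lemma pvApplyAll_inner_nodup (P : List (Int × Int × Int)) (g : pvG)
    (h : ∀ q ∈ g.items, q.2.keys.Nodup) :
    ∀ q ∈ (P.foldl pvApply g).items, q.2.keys.Nodup := by
  induction P generalizing g with
  | nil => exact h
  | cons t P ih =>
    rw [List.foldl_cons]
    apply ih
    intro q hq
    rcases (PySem.Dict.mem_items_insert _ _ _ _).mp hq with hq | hq
    · rw [hq]
      exact PySem.Dict.nodup_keys_insert _ _ _ (pvGetD_nodup g h t.1)
    · exact h q hq.1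

lemma pvApplyAll_keys_nodup (P : List (Int × Int × Int)) (g : pvG)
    (h : g.keys.Nodup) : (P.foldl pvApply g).keys.Nodup := by
  induction P generalizing g with
  | nil => exact h
  | cons t P ih =>
    rw [List.foldl_cons]
    exact ih _ (PySem.Dict.nodup_keys_insert _ _ _ h)

lemma pvInsert_self_noop {ν : Type} (d : PySem.Dict Int ν) (hnd : d.keys.Nodup) (x : Int) (v : ν)
    (h : d.get? x = some v) : d.insert x v = d := by
  have hc : d.contains x = true := by
    rw [PySem.Dict.contains_eq_isSome_get?, h]; rfl
  apply PySem.Dict.ext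
  rw [PySem.Dict.items_insert_of_contains _ _ hc]
  conv_rhs => rw [← List.map_id d.items]
  apply List.map_congr_left
  rintro ⟨p1, p2⟩ hp
  by_cases hpx : p1 = x
  · have hpv := PySem.Dict.get?_of_mem_items d hp hnd
    rw [hpx, h] at hpv
    simp only [hpx, BEq.rfl, if_pos, id_eq, Prod.mk.injEq, true_and]
    exact Option.some_inj.mp hpv
  · simp [hpx]

-- A's inner fold, once every condition read is known to agree with the snapshot,
-- is the patch fold of the selected triples
lemma pvFoldA_eq (s : pvG) (k : Int) (L : List (Int × Int)) (g : pvG)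
    (hnd : (L.map Prod.fst).Nodup)
    (hstab : ∀ p ∈ L, ((g.getD p.1 pvE).get? k) = ((s.getD p.1 pvE).get? k)) :
    L.foldl (pvEdgeStep k) g = (L.filterMap (pvSel s k)).foldl pvApply g := by
  induction L generalizing g with
  | nil => rfl
  | cons p L ih =>
    have hc : pvMiss (g.getD p.1 pvE) k = pvMiss (s.getD p.1 pvE) k :=
      pvMiss_congr (hstab p List.mem_cons_self)
    have hne : ∀ p' ∈ L, p'.1 ≠ p.1 := by
      intro p' hp' he
      exact (List.nodup_cons.mp hnd).1 (he ▸ List.mem_map_of_mem hp')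
    rw [List.foldl_cons, List.filterMap_cons]
    cases hm : pvMiss (s.getD p.1 pvE) k with
    | true =>
      have hsel : pvSel s k p = some (p.1, k, p.2) := by
        unfold pvSel; rw [hm]; rfl
      have hstep : pvEdgeStep k g p = pvApply g (p.1, k, p.2) := by
        unfold pvEdgeStep pvApply; rw [hc, hm]; rfl
      rw [hsel, hstep, List.foldl_cons]
      apply ih _ (List.nodup_cons.mp hnd).2
      intro p' hp'
      rw [← hstab p' (List.mem_cons_of_mem _ hp')]
      unfold pvApply
      rw [PySem.Dict.getD_insert, if_neg (hne p' hp')]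
    | false =>
      have hsel : pvSel s k p = none := by
        unfold pvSel; rw [hm]; rfl
      have hstep : pvEdgeStep k g p = g := by
        unfold pvEdgeStep; rw [hc, hm]; rfl
      rw [hsel, hstep]
      exact ih g (List.nodup_cons.mp hnd).2 (fun p' hp' => hstab p' (List.mem_cons_of_mem _ hp'))

-- the crux: patching k's own edge dict before processing it does not change the outcome
lemma pvNode_eq (s : pvG) (k : Int) (Pk : List (Int × Int)) (d : PySem.Dict Int Int) (g : pvG)
    (hdnd : d.keys.Nodup) (hPk : (Pk.map Prod.fst).Nodup)
    (hprop : ∀ pr ∈ Pk, (s.getD pr.1 pvE).get? k = some pr.2 ∧ pvMiss d pr.1 = true)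
    (hcont : ∀ pr ∈ Pk, g.contains pr.1 = true)
    (hstab : ∀ x, ((g.getD x pvE).get? k) = ((s.getD x pvE).get? k))
    (hginner : ∀ q ∈ g.items, q.2.keys.Nodup)
    (hgkeys : g.keys.Nodup) :
    ((Pk.foldl pvIns d).items.filterMap (pvSel s k)).foldl pvApply g
      = (d.items.filterMap (pvSel s k)).foldl pvApply g := by
  induction Pk generalizing d with
  | nil => rfl
  | cons pr Pk ih =>
    obtain ⟨hsk, hmiss⟩ := hprop pr List.mem_cons_self
    have hne : ∀ pr' ∈ Pk, pr'.1 ≠ pr.1 := by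
      intro p' hp' he
      exact (List.nodup_cons.mp hPk).1 (he ▸ List.mem_map_of_mem hp')
    have hd'nd : (pvIns d pr).keys.Nodup := PySem.Dict.nodup_keys_insert _ _ _ hdnd
    have hprop' : ∀ pr' ∈ Pk,
        (s.getD pr'.1 pvE).get? k = some pr'.2 ∧ pvMiss (pvIns d pr) pr'.1 = true := by
      intro pr' hp'
      refine ⟨(hprop pr' (List.mem_cons_of_mem _ hp')).1, ?_⟩
      rw [pvMiss_congr (d := pvIns d pr) (d' := d)
        (PySem.Dict.get?_insert_of_ne _ _ (hne pr' hp'))]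
      exact (hprop pr' (List.mem_cons_of_mem _ hp')).2
    rw [List.foldl_cons,
      ih (pvIns d pr) hd'nd (List.nodup_cons.mp hPk).2 hprop'
        (fun pr' hp' => hcont pr' (List.mem_cons_of_mem _ hp'))]
    -- compare the filterMaps over (pvIns d pr).items and d.items
    unfold pvMiss at hmiss
    cases hj : d.get? pr.1 with
    | some v =>
      rw [hj] at hmiss
      have hv : v = 0 := by simpa using hmiss
      have hc : d.contains pr.1 = true := by
        rw [PySem.Dict.contains_eq_isSome_get?, hj]; rfl
      show (((d.insert pr.1 pr.2).items).filterMap (pvSel s k)).foldl pvApply g = _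
      rw [PySem.Dict.items_insert_of_contains _ _ hc, List.filterMap_map]
      congr 1
      apply List.filterMap_congr
      intro p hp
      by_cases hpx : p.1 = pr.1
      · have hpv := PySem.Dict.get?_of_mem_items _ hp hdnd
        rw [hpx, hj, Option.some_inj] at hpv
        simp only [Function.comp, hpx, BEq.rfl, if_pos]
        unfold pvSel pvMiss
        rw [hpx, hsk]
        by_cases hz : pr.2 = 0
        · rw [← hpv, hv, hz]
        · simp [hz]
      · simp only [Function.comp]
        rw [if_neg (by simpa using hpx)]
    | none =>
      have hc : d.contains pr.1 = false := (PySem.Dict.get?_eq_none_iff_contains d pr.1).mp hj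
      show (((d.insert pr.1 pr.2).items).filterMap (pvSel s k)).foldl pvApply g = _
      rw [PySem.Dict.items_insert_of_not_contains _ _ hc, List.filterMap_append]
      have hsel : pvSel s k (pr.1, pr.2) =
          if pr.2 = 0 then some (pr.1, k, pr.2) else none := by
        unfold pvSel pvMiss
        rw [hsk]
        by_cases hz : pr.2 = 0 <;> simp [hz]
      by_cases hz : pr.2 = 0
      · rw [List.filterMap_cons, hsel, if_pos hz]
        simp only [List.filterMap_nil]
        rw [List.foldl_append, List.foldl_cons, List.foldl_nil]
        -- the cascade write is a no-op
        set g' := (d.items.filterMap (pvSel s k)).foldl pvApply g with hg'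
        have htne : ∀ t ∈ d.items.filterMap (pvSel s k), t.1 ≠ pr.1 ∨ t.2.1 ≠ k := by
          intro t ht
          left
          rcases List.mem_filterMap.mp ht with ⟨p, hp, hsome⟩
          unfold pvSel at hsome
          split_ifs at hsome with _hcnd
          · rw [Option.some_inj] at hsome
            rw [← hsome]
            intro he
            have hgp : d.get? p.1 = some p.2 := PySem.Dict.get?_of_mem_items _ hp hdnd
            rw [he, hj] at hgp
            simp at hgp
        have hstab' : (g'.getD pr.1 pvE).get? k = some pr.2 := by
          rw [hg', pvApplyAll_stable _ _ _ _ htne, hstab pr.1]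
          exact hsk
        have hcont' : g'.contains pr.1 = true :=
          pvApplyAll_contains _ _ _ (hcont pr List.mem_cons_self)
        have hinner' : (g'.getD pr.1 pvE).keys.Nodup :=
          pvGetD_nodup _ (pvApplyAll_inner_nodup _ _ hginner) _
        have hkeys' : g'.keys.Nodup := pvApplyAll_keys_nodup _ _ hgkeys
        obtain ⟨w, hw⟩ : ∃ w, g'.get? pr.1 = some w := by
          rw [PySem.Dict.contains_eq_isSome_get?] at hcont'
          exact Option.isSome_iff_exists.mp hcont'
        have hwD : g'.getD pr.1 pvE = w := PySem.Dict.getD_of_get?_eq_some _ _ hw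
        show pvApply g' (pr.1, k, pr.2) = g'
        unfold pvApply
        simp only
        rw [pvInsert_self_noop _ hinner' k pr.2 hstab', hwD]
        exact pvInsert_self_noop g' hkeys' pr.1 w hw
      · rw [List.filterMap_cons, hsel, if_neg hz]
        simp only [List.filterMap_nil, List.append_nil]

lemma pvValues_nodup_fold {α : Type} (l : List α) (key : α → Int)
    (f : α → PySem.Dict Int Int) (d : pvG)
    (hd : ∀ q ∈ d.items, q.2.keys.Nodup) (hf : ∀ a ∈ l, (f a).keys.Nodup) :
    ∀ q ∈ (l.foldl (fun d a => d.insert (key a) (f a)) d).items, q.2.keys.Nodup := by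
  induction l generalizing d with
  | nil => exact hd
  | cons a l ih =>
    rw [List.foldl_cons]
    apply ih
    · intro q hq
      rcases (PySem.Dict.mem_items_insert _ _ _ _).mp hq with hq | hq
      · rw [hq]; exact hf a List.mem_cons_self
      · exact hd q hq.1
    · exact fun a' ha' => hf a' (List.mem_cons_of_mem _ ha')

lemma pvToDict_keys_nodup (es : List (Int × Int)) : (pvToDict es).keys.Nodup :=
  PySem.Dict.nodup_keys_foldl_insert_key es Prod.fst (fun _ p => p.2) PySem.Dict.empty
    PySem.Dict.nodup_keys_empty

lemma pvGraph_keys_nodup (nodes : List Int) (init : List (Int × List (Int × Int))) :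
    (pvGraph nodes init).keys.Nodup := by
  unfold pvGraph
  exact PySem.Dict.nodup_keys_foldl_insert_key init Prod.fst (fun _ p => pvToDict p.2) _
    (PySem.Dict.nodup_keys_foldl_insert nodes (fun _ _ => PySem.Dict.empty) _
      PySem.Dict.nodup_keys_empty)

lemma pvGraph_inner_nodup (nodes : List Int) (init : List (Int × List (Int × Int))) :
    ∀ q ∈ (pvGraph nodes init).items, q.2.keys.Nodup := by
  unfold pvGraph
  apply pvValues_nodup_fold init Prod.fst (fun p => pvToDict p.2)
  · apply pvValues_nodup_fold nodes id (fun _ => PySem.Dict.empty)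
    · intro q hq
      simp [PySem.Dict.empty] at hq
    · exact fun _ _ => PySem.Dict.nodup_keys_empty
  · exact fun p _ => pvToDict_keys_nodup p.2

-- membership shape of one pending block
lemma pvPend_mem (s : pvG) (q : Int × PySem.Dict Int Int) (t : Int × Int × Int)
    (h : t ∈ pvPend s q) :
    t.2.1 = q.1 ∧ (t.1, t.2.2) ∈ q.2.items ∧ pvMiss (s.getD t.1 pvE) q.1 = true := by
  rcases List.mem_filterMap.mp h with ⟨p, hp, hsome⟩
  unfold pvSel at hsome
  split_ifs at hsome with hcnd
  · rw [Option.some_inj] at hsome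
    subst hsome
    exact ⟨rfl, hp, hcnd⟩

lemma pvPend_fst_sublist (s : pvG) (k : Int) (l : List (Int × Int)) :
    ((l.filterMap (pvSel s k)).map (·.1)).Sublist (l.map Prod.fst) := by
  induction l with
  | nil => simp
  | cons p l ih =>
    rw [List.filterMap_cons, List.map_cons]
    unfold pvSel
    split_ifs with hc
    · rw [List.map_cons]
      exact ih.cons₂ p.1
    · exact ih.cons p.1

lemma pvBlock_sublist (k j : Int) (lp : List (Int × Int × Int))
    (hj : ∀ t ∈ lp, t.1 = k → t.2.1 = j) (hnd : (lp.map (·.1)).Nodup) :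
    (((lp.filterMap (fun t => if t.1 = k then some (t.2.1, t.2.2) else none)).map
        Prod.fst)).Sublist [j] := by
  induction lp with
  | nil => simp
  | cons t lp ih =>
    rw [List.filterMap_cons]
    by_cases hc : t.1 = k
    · rw [if_pos hc, List.map_cons, hj t List.mem_cons_self hc]
      have hrest : lp.filterMap (fun t => if t.1 = k then some (t.2.1, t.2.2) else none) = [] := by
        apply List.filterMap_eq_nil_iff.mpr
        intro t' ht'
        rw [if_neg]
        intro he
        apply (List.nodup_cons.mp hnd).1
        show t.1 ∈ lp.map (·.1)
        rw [hc, ← he]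
        exact List.mem_map_of_mem ht'
      rw [hrest]
      simp
    · rw [if_neg hc]
      exact ih (fun t' ht' => hj t' (List.mem_cons_of_mem _ ht')) (List.nodup_cons.mp hnd).2

-- the patches of pre aimed at k: at most one per source, sources are pre's keys
lemma pvPk_fst_sublist (s : pvG) (k : Int) (pre : List (Int × PySem.Dict Int Int))
    (hinner : ∀ q ∈ pre, q.2.keys.Nodup) :
    (((pre.flatMap (pvPend s)).filterMap
        (fun t => if t.1 = k then some (t.2.1, t.2.2) else none)).map Prod.fst).Sublist
      (pre.map Prod.fst) := by
  rw [List.filterMap_flatMap, List.map_flatMap]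
  have : pre.map Prod.fst = pre.flatMap (fun q => [q.1]) := by
    rw [← List.map_eq_flatMap]
  rw [this]
  apply List.Sublist.flatMap_right
  intro q hq
  apply pvBlock_sublist
  · exact fun t ht _ => (pvPend_mem s q t ht).1
  · exact (pvPend_fst_sublist s q.1 q.2.items).nodup (by exact hinner q hq)

-- the main induction: processing the remaining nodes from the patched state lands on the full patch fold
lemma pvMain (s : pvG) (hs : s.keys.Nodup) (hinner : ∀ q ∈ s.items, q.2.keys.Nodup) :
    ∀ (suf pre : List (Int × PySem.Dict Int Int)), s.items = pre ++ suf →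
    suf.foldl (fun g q => pvNodeStep g q.1) ((pre.flatMap (pvPend s)).foldl pvApply s)
      = ((pre ++ suf).flatMap (pvPend s)).foldl pvApply s := by
  intro suf
  induction suf with
  | nil =>
    intro pre h
    rw [List.append_nil, List.foldl_nil]
  | cons q suf ih =>
    intro pre h
    have hq_items : s.items = (pre ++ [q]) ++ suf := by
      rw [h, List.append_assoc, List.singleton_append]
    have hq_mem : q ∈ s.items := by
      rw [h]; exact List.mem_append_right _ List.mem_cons_self
    have hfsts : ((pre ++ q :: suf).map Prod.fst).Nodup := by
      have : s.keys = s.items.map Prod.fst := rfl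
      rw [this, h] at hs
      exact hs
    have hknotpre : q.1 ∉ pre.map Prod.fst := by
      rw [List.map_append, List.nodup_append] at hfsts
      intro hmem
      exact hfsts.2.2 q.1 hmem q.1 (by simp) rfl
    have hkq : s.get? q.1 = some q.2 := PySem.Dict.get?_of_mem_items _ hq_mem hs
    have hsk : s.getD q.1 pvE = q.2 := PySem.Dict.getD_of_get?_eq_some _ _ hkq
    set P := pre.flatMap (pvPend s) with hP
    set g := P.foldl pvApply s with hg
    have hPmem : ∀ t ∈ P, ∃ q' ∈ pre, t.2.1 = q'.1 ∧ (t.1, t.2.2) ∈ q'.2.items ∧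
        pvMiss (s.getD t.1 pvE) q'.1 = true := by
      intro t ht
      rcases List.mem_flatMap.mp ht with ⟨q', hq', htq⟩
      obtain ⟨h1, h2, h3⟩ := pvPend_mem s q' t htq
      exact ⟨q', hq', h1, h2, h3⟩
    have htne : ∀ t ∈ P, t.2.1 ≠ q.1 := by
      intro t ht
      obtain ⟨q', hq', h1, _, _⟩ := hPmem t ht
      rw [h1]
      intro he
      exact hknotpre (he ▸ List.mem_map_of_mem hq')
    have hstab_all : ∀ x, ((g.getD x pvE).get? q.1) = ((s.getD x pvE).get? q.1) := by
      intro x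
      exact pvApplyAll_stable P s x q.1 (fun t ht => Or.inr (htne t ht))
    have hpre_mem : ∀ q' ∈ pre, q' ∈ s.items := by
      intro q' hq'
      rw [h]; exact List.mem_append_left _ hq'
    set Pk := P.filterMap (fun t => if t.1 = q.1 then some (t.2.1, t.2.2) else none) with hPk
    have hPkmem : ∀ pr ∈ Pk, ∃ q' ∈ pre, pr.1 = q'.1 ∧ (q.1, pr.2) ∈ q'.2.items ∧
        pvMiss (s.getD q.1 pvE) q'.1 = true := by
      intro pr hpr
      rcases List.mem_filterMap.mp hpr with ⟨t, ht, hsome⟩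
      split_ifs at hsome with hc
      · rw [Option.some_inj] at hsome
        obtain ⟨q', hq', h1, h2, h3⟩ := hPmem t ht
        subst hsome
        exact ⟨q', hq', h1, by rw [← hc]; exact h2, by rw [← hc]; exact h3⟩
    -- the per-node step
    have hnode : pvNodeStep g q.1 = (pvPend s q).foldl pvApply g := by
      unfold pvNodeStep
      rw [pvApplyAll_getD P s q.1, hsk, ← hPk]
      have hins : Pk.foldl pvIns q.2 = Pk.foldl (fun d pr => d.insert pr.1 pr.2) q.2 := rfl
      have hLnd : (((Pk.foldl pvIns q.2).items).map Prod.fst).Nodup := by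
        rw [hins]
        exact PySem.Dict.nodup_keys_foldl_insert_key Pk Prod.fst (fun _ pr => pr.2) q.2
          (hinner q hq_mem)
      rw [pvFoldA_eq s q.1 _ g hLnd (fun p _ => hstab_all p.1)]
      rw [pvNode_eq s q.1 Pk q.2 g (hinner q hq_mem)
        ((pvPk_fst_sublist s q.1 pre (fun q' hq' => hinner q' (hpre_mem q' hq'))).nodup
          (by rw [List.map_append, List.nodup_append] at hfsts; exact hfsts.1))
        ?_ ?_ hstab_all (pvApplyAll_inner_nodup P s hinner) (pvApplyAll_keys_nodup P s hs)]
      · rfl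
      · intro pr hpr
        obtain ⟨q', hq', h1, h2, h3⟩ := hPkmem pr hpr
        have hq's : s.getD q'.1 pvE = q'.2 :=
          PySem.Dict.getD_of_get?_eq_some _ _
            (PySem.Dict.get?_of_mem_items _ (hpre_mem q' hq') hs)
        constructor
        · rw [h1, hq's]
          exact PySem.Dict.get?_of_mem_items _ h2 (hinner q' (hpre_mem q' hq'))
        · rw [hsk] at h3
          rw [h1]
          exact h3
      · intro pr hpr
        obtain ⟨q', hq', h1, _, _⟩ := hPkmem pr hpr
        apply pvApplyAll_contains
        rw [h1]
        exact (PySem.Dict.contains_iff_mem_keys _ _).mpr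
          (PySem.Dict.mem_keys_of_mem_items s (hpre_mem q' hq'))
    rw [List.foldl_cons, hnode]
    have hfold : (pvPend s q).foldl pvApply g = ((pre ++ [q]).flatMap (pvPend s)).foldl pvApply s := by
      rw [List.flatMap_append, List.foldl_append, ← hP, ← hg]
      simp
    rw [hfold, ih (pre ++ [q]) hq_items, List.append_assoc, List.singleton_append]

-- ===== B-side lemmas =====

-- the reverse-index construction is the patch fold of all (target, source, value) triples
lemma pvRev_eq (base : pvG) :
    pvRev base = (pvTriples base).foldl pvApply
      (base.keys.foldl (fun d k => d.insert k pvE) PySem.Dict.empty) := by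
  unfold pvRev pvTriples
  rw [List.foldl_flatMap]
  congr 1
  funext r q
  rw [List.foldl_map]
  rfl

-- every value of the {k: {} for k in base} seed is the empty dict
lemma pvRev0_getD (l : List Int) (d : pvG) (k : Int) (hd : ∀ k', d.getD k' pvE = pvE) :
    ((l.foldl (fun d n => d.insert n pvE) d).getD k pvE) = pvE := by
  induction l generalizing d with
  | nil => exact hd k
  | cons n l ih =>
    rw [List.foldl_cons]
    apply ih
    intro k'
    rw [PySem.Dict.getD_insert]
    split_ifs with h
    · rfl
    · exact hd k'

-- a guarded insert loop from fresh keys builds exactly the filtered list as items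
lemma pvAdds_items_aux (l : List (Int × Int)) (cond : Int → Bool) (d : PySem.Dict Int Int)
    (hfresh : ∀ p ∈ l, d.contains p.1 = false) (hnd : (l.map Prod.fst).Nodup) :
    (l.foldl (fun d p => if cond p.1 then d.insert p.1 p.2 else d) d).items
      = d.items ++ l.filter (fun p => cond p.1) := by
  induction l generalizing d with
  | nil => simp
  | cons p l ih =>
    rw [List.foldl_cons, List.filter_cons]
    have hne : ∀ p' ∈ l, p'.1 ≠ p.1 := by
      intro p' hp' he
      exact (List.nodup_cons.mp hnd).1 (he ▸ List.mem_map_of_mem hp')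
    cases hcp : cond p.1 with
    | true =>
      simp only [if_true]
      rw [ih (d.insert p.1 p.2) ?_ (List.nodup_cons.mp hnd).2]
      · rw [PySem.Dict.items_insert_of_not_contains _ _ (hfresh p List.mem_cons_self)]
        simp
      · intro p' hp'
        rw [PySem.Dict.contains_insert, hfresh p' (List.mem_cons_of_mem _ hp')]
        simp [hne p' hp']
    | false =>
      simp only [Bool.false_eq_true, if_false]
      exact ih d (fun p' hp' => hfresh p' (List.mem_cons_of_mem _ hp')) (List.nodup_cons.mp hnd).2

-- items of a patch fold when every patched key already exists: same keys, patched values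
lemma pvItems_applyAll (P : List (Int × Int × Int)) (g : pvG)
    (hc : ∀ t ∈ P, g.contains t.1 = true) (hnd : g.keys.Nodup) :
    (P.foldl pvApply g).items
      = g.items.map (fun q => (q.1,
          (P.filterMap (fun t => if t.1 = q.1 then some (t.2.1, t.2.2) else none)).foldl pvIns q.2)) := by
  induction P generalizing g with
  | nil =>
    simp only [List.foldl_nil, List.filterMap_nil]
    exact (List.map_id' g.items).symm
  | cons t P ih =>
    rw [List.foldl_cons]
    have hct : g.contains t.1 = true := hc t List.mem_cons_self
    have hc' : ∀ u ∈ P, (pvApply g t).contains u.1 = true := by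
      intro u hu
      unfold pvApply
      rw [PySem.Dict.contains_insert, hc u (List.mem_cons_of_mem _ hu), Bool.or_true]
    have hitems : (pvApply g t).items
        = g.items.map (fun p => if p.1 == t.1 then (t.1, (g.getD t.1 pvE).insert t.2.1 t.2.2) else p) := by
      unfold pvApply
      rw [PySem.Dict.items_insert_of_contains _ _ hct]
    rw [ih (pvApply g t) hc' (PySem.Dict.nodup_keys_insert _ _ _ hnd), hitems, List.map_map]
    apply List.map_congr_left
    rintro ⟨p1, p2⟩ hp
    simp only [Function.comp, List.filterMap_cons]
    by_cases hpt : p1 = t.1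
    · have hg : g.getD t.1 pvE = p2 := by
        rw [← hpt]; exact PySem.Dict.getD_of_mem_items _ hp hnd pvE
      simp only [hpt, BEq.rfl, if_pos, List.foldl_cons]
      rw [hg]
      rfl
    · have hb : (p1 == t.1) = false := by simpa using hpt
      simp only [hb, Bool.false_eq_true, if_false]
      rw [if_neg (fun he => hpt he.symm)]

-- the snapshot pending list aimed at k equals the filtered triples aimed at k
lemma pvPk_eq_triples (s : pvG) (k : Int) :
    (s.items.flatMap (pvPend s)).filterMap
        (fun t => if t.1 = k then some (t.2.1, t.2.2) else none)
      = ((pvTriples s).filterMap (fun t => if t.1 = k then some (t.2.1, t.2.2) else none)).filter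
          (fun p => pvMiss (s.getD k pvE) p.1) := by
  unfold pvTriples
  rw [List.filterMap_flatMap, List.filterMap_flatMap, List.filter_flatMap]
  apply List.flatMap_congr  -- pointwise over s.items
  intro q _
  unfold pvPend
  rw [List.filterMap_filterMap, List.filterMap_map, List.filter_filterMap]
  apply List.filterMap_congr
  intro p _
  unfold pvSel
  by_cases hpk : p.1 = k
  · subst hpk
    by_cases hm : pvMiss (s.getD p.1 pvE) q.1 = true <;> simp [hm, Option.filter]
  · by_cases hm : pvMiss (s.getD p.1 pvE) q.1 = true <;> simp [hm, hpk, Option.filter]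

-- sources of the triples aimed at k are distinct (one per node of the snapshot)
lemma pvTriples_fst_sublist (s : pvG) (k : Int) (hinner : ∀ q ∈ s.items, q.2.keys.Nodup) :
    ((((pvTriples s).filterMap
        (fun t => if t.1 = k then some (t.2.1, t.2.2) else none)).map Prod.fst)).Sublist s.keys := by
  unfold pvTriples
  rw [List.filterMap_flatMap, List.map_flatMap]
  have hk : s.keys = s.items.flatMap (fun q => [q.1]) := by
    rw [← List.map_eq_flatMap]; rfl
  rw [hk]
  apply List.Sublist.flatMap_right
  intro q hq
  apply pvBlock_sublist
  · intro t ht _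
    rcases List.mem_map.mp ht with ⟨p, _, hpt⟩
    rw [← hpt]
  · rw [List.map_map]
    exact hinner q hq

-- ===== VERDICT (by name: the statement is the Claim_ definition above) =====
theorem construct_directed_graph_spec : Claim_equal_construct_directed_graph := by
  intro nodes init _hdom hpre
  simp only [Spec_construct_directed_graph, construct_directed_graph, construct_directed_graph_alt]
  have hs := pvGraph_keys_nodup nodes init
  have hinner := pvGraph_inner_nodup nodes init
  set s := pvGraph nodes init with hsdef
  have hmain := pvMain s hs hinner s.items [] rfl
  simp only [List.nil_append, List.flatMap_nil, List.foldl_nil] at hmain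
  have hkeys : s.keys.foldl pvNodeStep s = s.items.foldl (fun g q => pvNodeStep g q.1) s := by
    rw [show s.keys = s.items.map Prod.fst from rfl, List.foldl_map]
  rw [hkeys, hmain]
  set P := s.items.flatMap (pvPend s) with hP
  have hPc : ∀ t ∈ P, s.contains t.1 = true := by
    intro t ht
    rcases List.mem_flatMap.mp ht with ⟨q, hq, htq⟩
    obtain ⟨_, h2, _⟩ := pvPend_mem s q t htq
    exact hpre q hq (t.1, t.2.2) h2
  rw [pvItems_applyAll P s hPc hs, List.map_map]
  apply List.map_congr_left
  rintro ⟨k, e⟩ hq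
  simp only [Function.comp]
  have hske : s.getD k pvE = e :=
    PySem.Dict.getD_of_mem_items s hq hs pvE
  -- B's adds dict has exactly A's patch list (aimed at k) as its items
  have hrevk : (pvRev s).getD k pvE
      = ((pvTriples s).filterMap
          (fun t => if t.1 = k then some (t.2.1, t.2.2) else none)).foldl pvIns pvE := by
    rw [pvRev_eq, pvApplyAll_getD,
      pvRev0_getD s.keys PySem.Dict.empty k (fun k' => PySem.Dict.getD_empty k' pvE)]
  set L := (pvTriples s).filterMap (fun t => if t.1 = k then some (t.2.1, t.2.2) else none) with hL
  have hLnd : (L.map Prod.fst).Nodup := (pvTriples_fst_sublist s k hinner).nodup hs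
  have hLitems : (L.foldl pvIns pvE).items = L := by
    have := PySem.Dict.items_foldl_insert_fresh L Prod.fst Prod.snd PySem.Dict.empty
      (fun a _ => PySem.Dict.contains_empty a.1) hLnd
    simpa using this
  have hadds : (pvAdds e ((pvRev s).getD k pvE)).items
      = L.filter (fun p => pvMiss e p.1) := by
    unfold pvAdds
    rw [hrevk, hLitems,
      pvAdds_items_aux L (fun j => pvMiss e j) PySem.Dict.empty
        (fun p _ => PySem.Dict.contains_empty p.1) hLnd]
    simp [PySem.Dict.empty]
  rw [hadds]
  have hPk : P.filterMap (fun t => if t.1 = k then some (t.2.1, t.2.2) else none)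
      = L.filter (fun p => pvMiss e p.1) := by
    rw [hP, pvPk_eq_triples s k, hske, ← hL]
  rw [hPk]
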